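-- pv_equiv track=rewrite | github.com/pb2323/SafeHive | safehive/agents/honest_vendor.py | _classify_user_input
-- ===== SOURCE A (Python) =====
-- def _classify_user_input(user_input: str) -> str:
--     """Classify user input to determine response type"""
--     user_input_lower = user_input.lower()
--
--     if any(word in user_input_lower for word in ["hello", "hi", "hey", "good morning", "good afternoon"]):
--         return "greeting"
--     elif any(word in user_input_lower for word in ["menu", "what do you have", "available", "options"]):
--         return "menu_inquiry"
--     elif any(word in user_input_lower for word in ["order", "buy", "purchase", "get", "want"]):
--         return "order_request"
--     elif any(word in user_input_lower for word in ["complaint", "problem", "issue", "wrong", "bad"]):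
--         return "complaint"
--     elif any(word in user_input_lower for word in ["recommend", "suggest", "best", "popular"]):
--         return "recommendation_request"
--     else:
--         return "general"
-- ===== SOURCE B (Python) =====
-- _NAMES = ("greeting", "menu_inquiry", "order_request", "complaint",
--           "recommendation_request")
--
-- # every keyword paired with the index of its category in _NAMES
-- _KEYWORDS = (
--     ("hello", 0), ("hi", 0), ("hey", 0), ("good morning", 0), ("good afternoon", 0),
--     ("menu", 1), ("what do you have", 1), ("available", 1), ("options", 1),
--     ("order", 2), ("buy", 2), ("purchase", 2), ("get", 2), ("want", 2),
--     ("complaint", 3), ("problem", 3), ("issue", 3), ("wrong", 3), ("bad", 3),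
--     ("recommend", 4), ("suggest", 4), ("best", 4), ("popular", 4),
-- )
--
--
-- def _classify_user_input(user_input: str) -> str:
--     """Collect ALL matching keywords, then pick the highest-priority
--     (lowest-index) category; no match means "general"."""
--     s = user_input.lower()
--     hits = [i for k, i in _KEYWORDS if k in s]
--     return _NAMES[min(hits)] if hits else "general"
-- ===== Notes on version B (the rewrite author's own statement) =====
-- stated objective: alternative
-- what changed: Instead of an if/elif chain of any()-groups with short-circuit, B collects the category indices of ALL matching keywords from one flat keyword-to-index table and aggregates them with min() (priority = lowest index), indexing a name tuple, with a default category when nothing matches.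
import Mathlib
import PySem

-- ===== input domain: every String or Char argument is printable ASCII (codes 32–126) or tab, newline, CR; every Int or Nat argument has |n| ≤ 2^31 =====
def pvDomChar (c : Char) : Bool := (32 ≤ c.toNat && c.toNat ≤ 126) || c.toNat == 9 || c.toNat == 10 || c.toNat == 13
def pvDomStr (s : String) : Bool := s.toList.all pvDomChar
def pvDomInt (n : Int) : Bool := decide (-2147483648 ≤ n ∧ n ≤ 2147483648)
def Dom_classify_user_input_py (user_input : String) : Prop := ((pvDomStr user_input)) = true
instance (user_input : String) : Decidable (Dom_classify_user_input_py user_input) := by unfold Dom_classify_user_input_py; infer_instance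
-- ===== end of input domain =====

-- B replaces A's if/elif chain of any()-groups by collecting all matching keywords from a flat keyword->category-index table and aggregating with min (alternative decomposition, same cost).


-- ===== PORT A =====
def classify_user_input_py (user_input : String) : String :=
  let user_input_lower := PySem.Str.lower user_input
  if ["hello", "hi", "hey", "good morning", "good afternoon"].any
      (fun word => PySem.Str.isIn word user_input_lower) then "greeting"
  else if ["menu", "what do you have", "available", "options"].any
      (fun word => PySem.Str.isIn word user_input_lower) then "menu_inquiry"
  else if ["order", "buy", "purchase", "get", "want"].any
      (fun word => PySem.Str.isIn word user_input_lower) then "order_request"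
  else if ["complaint", "problem", "issue", "wrong", "bad"].any
      (fun word => PySem.Str.isIn word user_input_lower) then "complaint"
  else if ["recommend", "suggest", "best", "popular"].any
      (fun word => PySem.Str.isIn word user_input_lower) then "recommendation_request"
  else "general"

-- ===== PORT B =====
def pvNames : List String :=
  ["greeting", "menu_inquiry", "order_request", "complaint", "recommendation_request"]

def pvKeywords : List (String × Nat) :=
  [("hello", 0), ("hi", 0), ("hey", 0), ("good morning", 0), ("good afternoon", 0),
   ("menu", 1), ("what do you have", 1), ("available", 1), ("options", 1),
   ("order", 2), ("buy", 2), ("purchase", 2), ("get", 2), ("want", 2),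
   ("complaint", 3), ("problem", 3), ("issue", 3), ("wrong", 3), ("bad", 3),
   ("recommend", 4), ("suggest", 4), ("best", 4), ("popular", 4)]

def classify_user_input_py_alt (user_input : String) : String :=
  let s := PySem.Str.lower user_input
  let hits := pvKeywords.filterMap (fun p => if PySem.Str.isIn p.1 s then some p.2 else none)
  match hits.min? with
  | some i => pvNames.getD i "general"
  | none => "general"

-- ===== PRECONDITION & SPEC =====
def Spec_classify_user_input_py (user_input : String) (out : String) : Prop := out = classify_user_input_py_alt user_input
instance (user_input : String) (out : String) : Decidable (Spec_classify_user_input_py user_input out) := by unfold Spec_classify_user_input_py; infer_instance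

-- ===== CLAIM (what is proved, stated in full; the proofs are below) =====
def Claim_equal_classify_user_input_py : Prop := ∀ (user_input : String), Dom_classify_user_input_py user_input → Spec_classify_user_input_py user_input (classify_user_input_py user_input)

-- ===== LEMMAS AND PROOFS =====

theorem pv_foldl_min_of_le (l : List Nat) (c : Nat) (h : ∀ x ∈ l, c ≤ x) :
    l.foldl min c = c := by
  induction l with
  | nil => rfl
  | cons a l ih =>
    simp only [List.foldl_cons]
    rw [min_eq_left (h a (by simp))]
    exact ih (fun x hx => h x (by simp [hx]))

-- min over all matched indices = index of the first match, when indices are nondecreasing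
theorem pv_min_filterMap_eq_find (q : String × Nat → Bool) (l : List (String × Nat))
    (h : l.Pairwise fun a b => a.2 ≤ b.2) :
    (l.filterMap (fun p => if q p then some p.2 else none)).min? =
      (l.find? q).map Prod.snd := by
  induction l with
  | nil => rfl
  | cons a l ih =>
    rcases List.pairwise_cons.mp h with ⟨ha, hl⟩
    by_cases hf : q a
    · have e : (a :: l).filterMap (fun p => if q p then some p.2 else none) =
          a.2 :: l.filterMap (fun p => if q p then some p.2 else none) := by
        simp [hf]
      rw [e, List.min?_cons', List.find?_cons_of_pos hf, Option.map_some]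
      congr 1
      refine pv_foldl_min_of_le _ _ (fun x hx => ?_)
      rcases List.mem_filterMap.mp hx with ⟨p, hp, hpx⟩
      have := ha p hp
      split at hpx
      · cases hpx; omega
      · cases hpx
    · rw [List.filterMap_cons_none (by simp [hf]), List.find?_cons_of_neg (by simp [hf])]
      exact ih hl

theorem pv_find_step_pos (t k : String) (i : Nat) (l : List (String × Nat))
    (h : PySem.Str.isIn k t = true) :
    List.find? (fun p => PySem.Str.isIn p.1 t) ((k, i) :: l) = some (k, i) :=
  List.find?_cons_of_pos (by simpa using h)

theorem pv_find_step_neg (t k : String) (i : Nat) (l : List (String × Nat))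
    (h : PySem.Str.isIn k t = false) :
    List.find? (fun p => PySem.Str.isIn p.1 t) ((k, i) :: l) =
      List.find? (fun p => PySem.Str.isIn p.1 t) l :=
  List.find?_cons_of_neg (by simpa using h)

-- ===== VERDICT (by name: the statement is the Claim_ definition above) =====
theorem classify_user_input_py_spec : Claim_equal_classify_user_input_py := by
  intro s _
  unfold Spec_classify_user_input_py classify_user_input_py classify_user_input_py_alt
  dsimp only
  generalize PySem.Str.lower s = t
  rw [pv_min_filterMap_eq_find _ _ (by decide)]
  unfold pvKeywords
  simp only [List.any_cons, List.any_nil, Bool.or_false]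
  cases h1 : PySem.Str.isIn "hello" t
  case true => rw [pv_find_step_pos _ _ _ _ h1]; rfl
  case false =>
  rw [pv_find_step_neg _ _ _ _ h1]
  cases h2 : PySem.Str.isIn "hi" t
  case true => rw [pv_find_step_pos _ _ _ _ h2]; rfl
  case false =>
  rw [pv_find_step_neg _ _ _ _ h2]
  cases h3 : PySem.Str.isIn "hey" t
  case true => rw [pv_find_step_pos _ _ _ _ h3]; rfl
  case false =>
  rw [pv_find_step_neg _ _ _ _ h3]
  cases h4 : PySem.Str.isIn "good morning" t
  case true => rw [pv_find_step_pos _ _ _ _ h4]; rfl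
  case false =>
  rw [pv_find_step_neg _ _ _ _ h4]
  cases h5 : PySem.Str.isIn "good afternoon" t
  case true => rw [pv_find_step_pos _ _ _ _ h5]; rfl
  case false =>
  rw [pv_find_step_neg _ _ _ _ h5]
  cases h6 : PySem.Str.isIn "menu" t
  case true => rw [pv_find_step_pos _ _ _ _ h6]; rfl
  case false =>
  rw [pv_find_step_neg _ _ _ _ h6]
  cases h7 : PySem.Str.isIn "what do you have" t
  case true => rw [pv_find_step_pos _ _ _ _ h7]; rfl
  case false =>
  rw [pv_find_step_neg _ _ _ _ h7]
  cases h8 : PySem.Str.isIn "available" t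
  case true => rw [pv_find_step_pos _ _ _ _ h8]; rfl
  case false =>
  rw [pv_find_step_neg _ _ _ _ h8]
  cases h9 : PySem.Str.isIn "options" t
  case true => rw [pv_find_step_pos _ _ _ _ h9]; rfl
  case false =>
  rw [pv_find_step_neg _ _ _ _ h9]
  cases h10 : PySem.Str.isIn "order" t
  case true => rw [pv_find_step_pos _ _ _ _ h10]; rfl
  case false =>
  rw [pv_find_step_neg _ _ _ _ h10]
  cases h11 : PySem.Str.isIn "buy" t
  case true => rw [pv_find_step_pos _ _ _ _ h11]; rfl
  case false =>
  rw [pv_find_step_neg _ _ _ _ h11]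
  cases h12 : PySem.Str.isIn "purchase" t
  case true => rw [pv_find_step_pos _ _ _ _ h12]; rfl
  case false =>
  rw [pv_find_step_neg _ _ _ _ h12]
  cases h13 : PySem.Str.isIn "get" t
  case true => rw [pv_find_step_pos _ _ _ _ h13]; rfl
  case false =>
  rw [pv_find_step_neg _ _ _ _ h13]
  cases h14 : PySem.Str.isIn "want" t
  case true => rw [pv_find_step_pos _ _ _ _ h14]; rfl
  case false =>
  rw [pv_find_step_neg _ _ _ _ h14]
  cases h15 : PySem.Str.isIn "complaint" t
  case true => rw [pv_find_step_pos _ _ _ _ h15]; rfl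
  case false =>
  rw [pv_find_step_neg _ _ _ _ h15]
  cases h16 : PySem.Str.isIn "problem" t
  case true => rw [pv_find_step_pos _ _ _ _ h16]; rfl
  case false =>
  rw [pv_find_step_neg _ _ _ _ h16]
  cases h17 : PySem.Str.isIn "issue" t
  case true => rw [pv_find_step_pos _ _ _ _ h17]; rfl
  case false =>
  rw [pv_find_step_neg _ _ _ _ h17]
  cases h18 : PySem.Str.isIn "wrong" t
  case true => rw [pv_find_step_pos _ _ _ _ h18]; rfl
  case false =>
  rw [pv_find_step_neg _ _ _ _ h18]
  cases h19 : PySem.Str.isIn "bad" t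
  case true => rw [pv_find_step_pos _ _ _ _ h19]; rfl
  case false =>
  rw [pv_find_step_neg _ _ _ _ h19]
  cases h20 : PySem.Str.isIn "recommend" t
  case true => rw [pv_find_step_pos _ _ _ _ h20]; rfl
  case false =>
  rw [pv_find_step_neg _ _ _ _ h20]
  cases h21 : PySem.Str.isIn "suggest" t
  case true => rw [pv_find_step_pos _ _ _ _ h21]; rfl
  case false =>
  rw [pv_find_step_neg _ _ _ _ h21]
  cases h22 : PySem.Str.isIn "best" t
  case true => rw [pv_find_step_pos _ _ _ _ h22]; rfl
  case false =>
  rw [pv_find_step_neg _ _ _ _ h22]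
  cases h23 : PySem.Str.isIn "popular" t
  case true => rw [pv_find_step_pos _ _ _ _ h23]; rfl
  case false =>
  rw [pv_find_step_neg _ _ _ _ h23]
  rfl
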